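-- pv_equiv track=rewrite | github.com/NahidAkhtar84/after_academy_data_structure_problems_solutions | 2.reverse_bits.py | convert_int_to_bin
-- ===== SOURCE A (Python) =====
-- def convert_int_to_bin(num):
--     mixin = 1
--     int_num = 0
--     num = str(num)
--     for itm in num[::-1]:
--         int_num += int(itm)*mixin
--         mixin *= 2
--
--     return int_num
-- ===== SOURCE B (Python) =====
-- def convert_int_to_bin(num):
--     result = 0
--     for c in str(num):
--         result = result * 2 + int(c)
--     return result
-- ===== Notes on version B (the rewrite author's own statement) =====
-- stated objective: simpler
-- what changed: Forward left-to-right Horner pass (result = result*2 + digit) over str(num) replaces the reversed power-weighted pass, dropping the explicit mixin power accumulator.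
import Mathlib
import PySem

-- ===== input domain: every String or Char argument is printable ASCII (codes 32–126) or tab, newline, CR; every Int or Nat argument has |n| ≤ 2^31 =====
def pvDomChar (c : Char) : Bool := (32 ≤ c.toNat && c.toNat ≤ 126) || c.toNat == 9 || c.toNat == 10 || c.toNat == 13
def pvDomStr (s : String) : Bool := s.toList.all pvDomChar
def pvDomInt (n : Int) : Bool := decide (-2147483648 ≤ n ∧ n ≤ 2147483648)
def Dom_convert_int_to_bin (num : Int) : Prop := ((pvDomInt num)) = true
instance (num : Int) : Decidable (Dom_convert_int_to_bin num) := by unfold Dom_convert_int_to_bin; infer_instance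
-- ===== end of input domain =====

-- B replaces A's reversed power-weighted accumulation with a forward Horner pass
-- (result = result*2 + digit) over str(num); objective: simpler (drops the mixin variable).


-- ===== PORT A =====
-- int(itm) for a single character itm; Python raises ValueError on a non-digit
-- (only reachable for negative num, via the '-' sign) — excluded by Pre_, so getD 0 is never hit.
def pvDigit (c : Char) : Int := (PySem.Int.ofChars? [c]).getD 0

-- for itm in num[::-1]: int_num += int(itm)*mixin; mixin *= 2   -- state = (mixin, int_num)
def convert_int_to_bin (num : Int) : Int :=
  ((((PySem.Int.toChars num).reverse).foldl
      (fun (s : Int × Int) c => (s.1 * 2, s.2 + pvDigit c * s.1)) (1, 0))).2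

-- ===== PORT B =====
-- for c in str(num): result = result * 2 + int(c)
def convert_int_to_bin_alt (num : Int) : Int :=
  (PySem.Int.toChars num).foldl (fun r c => r * 2 + pvDigit c) 0

-- ===== PRECONDITION & SPEC =====
-- Python A raises ValueError on negative num (int('-')); B raises identically there.
def Pre_convert_int_to_bin (num : Int) : Prop := 0 ≤ num
instance (num : Int) : Decidable (Pre_convert_int_to_bin num) := by unfold Pre_convert_int_to_bin; infer_instance
def pvWitness_convert_int_to_bin : Int := 23

def Spec_convert_int_to_bin (num : Int) (out : Int) : Prop := out = convert_int_to_bin_alt num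
instance (num : Int) (out : Int) : Decidable (Spec_convert_int_to_bin num out) := by unfold Spec_convert_int_to_bin; infer_instance

-- ===== CLAIM (what is proved, stated in full; the proofs are below) =====
def Claim_equal_convert_int_to_bin : Prop := ∀ (num : Int), Dom_convert_int_to_bin num → Pre_convert_int_to_bin num → Spec_convert_int_to_bin num (convert_int_to_bin num)

-- ===== LEMMAS AND PROOFS =====

-- Horner fold with seed a equals a·2^|l| plus the fold with seed 0.
theorem pvHornerShift (l : List Char) (a : Int) :
    l.foldl (fun r c => r * 2 + pvDigit c) a
      = a * 2 ^ l.length + l.foldl (fun r c => r * 2 + pvDigit c) 0 := by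
  induction l generalizing a with
  | nil => simp
  | cons d t ih =>
    simp only [List.foldl_cons, List.length_cons]
    rw [ih (a * 2 + pvDigit d), ih (0 * 2 + pvDigit d)]
    ring

-- A's reversed power-weighted fold computes (2^|l|, Horner value of l).
theorem pvRevFold (l : List Char) :
    l.reverse.foldl (fun (s : Int × Int) c => (s.1 * 2, s.2 + pvDigit c * s.1)) (1, 0)
      = (2 ^ l.length, l.foldl (fun r c => r * 2 + pvDigit c) 0) := by
  induction l with
  | nil => simp
  | cons d t ih =>
    simp only [List.reverse_cons, List.foldl_append, ih, List.foldl_cons, List.length_cons]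
    rw [pvHornerShift t (0 * 2 + pvDigit d), List.foldl_nil, Prod.mk.injEq]
    constructor
    · ring
    · ring

-- ===== VERDICT (by name: the statement is the Claim_ definition above) =====
theorem convert_int_to_bin_spec : Claim_equal_convert_int_to_bin := by
  intro num _ _
  unfold Spec_convert_int_to_bin convert_int_to_bin convert_int_to_bin_alt
  rw [pvRevFold]
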